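-- pv_equiv track=rewrite | github.com/BruthaVoodoo/adws-work | scripts/adw_modules/console_parser.py | _deduplicate_logs
-- ===== SOURCE A (Python) =====
-- def _deduplicate_logs(text: str) -> str:
--     """
--     Deduplicate repeated log messages, showing once with count.
--
--     Args:
--         text: Text with potentially repeated lines
--
--     Returns:
--         Deduplicated text with counts
--     """
--     lines = text.split("\n")
--     seen_lines = {}
--     result = []
--
--     for line in lines:
--         # Skip empty lines
--         if not line.strip():
--             continue
--
--         # Normalize whitespace for comparison
--         normalized = " ".join(line.split())
--
--         if normalized in seen_lines:
--             seen_lines[normalized]["count"] += 1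
--         else:
--             seen_lines[normalized] = {"original": line, "count": 1}
--             result.append(line)
--
--     # Add count annotations for duplicates
--     final_result = []
--     for line in result:
--         normalized = " ".join(line.split())
--         count = seen_lines[normalized]["count"]
--         if count > 1:
--             final_result.append(f"{line} [repeated {count}x]")
--         else:
--             final_result.append(line)
--
--     return "\n".join(final_result)
-- ===== SOURCE B (Python) =====
-- def _deduplicate_logs(text: str) -> str:
--     """Hash-free rewrite: pre-filter the non-blank lines, pair each with its
--     normalized key via zip, decide first-occurrence by scanning the list of
--     keys already walked, and get the total count with a list.count scan."""
--     lines = [l for l in text.split("\n") if l.strip()]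
--     keys = [" ".join(l.split()) for l in lines]
--     out = []
--     prev = []
--     for line, key in zip(lines, keys):
--         if key not in prev:
--             c = keys.count(key)
--             out.append(f"{line} [repeated {c}x]" if c > 1 else line)
--         prev.append(key)
--     return "\n".join(out)
-- ===== Notes on version B (the rewrite author's own statement) =====
-- stated objective: alternative
-- what changed: B drops A's dict of first-occurrence records entirely: it pre-filters the non-blank lines, zips them with their normalized keys, detects first occurrences by a linear scan of the previously walked keys, and reads each count with list.count over the key list, trading A's hash table for plain list scans.
import Mathlib
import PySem

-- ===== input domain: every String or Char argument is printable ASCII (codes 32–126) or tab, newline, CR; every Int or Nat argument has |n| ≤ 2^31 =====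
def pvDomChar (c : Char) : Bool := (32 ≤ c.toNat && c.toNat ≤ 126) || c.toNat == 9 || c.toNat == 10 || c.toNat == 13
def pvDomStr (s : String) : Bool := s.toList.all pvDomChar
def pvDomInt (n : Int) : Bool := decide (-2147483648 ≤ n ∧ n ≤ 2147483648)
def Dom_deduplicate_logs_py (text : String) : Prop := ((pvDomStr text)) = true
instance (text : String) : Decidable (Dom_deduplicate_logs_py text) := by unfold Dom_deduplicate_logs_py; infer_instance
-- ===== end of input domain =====

-- B replaces A's dict-of-records algorithm by a hash-free one: filter the non-blank lines,
-- zip them with their normalized keys, detect first occurrences by scanning the previously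
-- walked keys and read counts with list.count (objective: alternative; B is quadratic).

-- shared helpers (both Pythons compute the same normalization / blank test / annotation text);
-- text.split("\n") has a nonempty separator, so split? is always `some`: the .getD [] is exact
def pvLines (text : String) : List String := (PySem.Str.split? text "\n").getD []
def pvNorm (l : String) : String := PySem.Str.join " " (PySem.Str.split₀ l)
def pvBlank (l : String) : Bool := PySem.Str.strip l == ""
def pvAnnot (l : String) (c : Int) : String :=
  if 1 < c then PySem.Str.join "" [l, " [repeated ", PySem.Int.toStr c, "x]"] else l

-- ===== PORT A =====
def deduplicate_logs_py (text : String) : String :=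
  let lines := pvLines text
  let st := lines.foldl
    (fun (st : PySem.Dict String (String × Int) × List String) line =>
      if pvBlank line then st
      else
        if st.1.contains (pvNorm line) then
          (st.1.modify (pvNorm line) ("", 0) (fun p => (p.1, p.2 + 1)), st.2)
        else (st.1.insert (pvNorm line) (line, 1), st.2 ++ [line]))
    (PySem.Dict.empty, [])
  let final := st.2.map (fun line => pvAnnot line ((st.1.getD (pvNorm line) ("", 0)).2))
  PySem.Str.join "\n" final

-- ===== PORT B =====
def deduplicate_logs_py_alt (text : String) : String :=
  let lines := (pvLines text).filter (fun l => !pvBlank l)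
  let keys := lines.map pvNorm
  let st := (lines.zip keys).foldl
    (fun (st : List String × List String) lk =>
      (if st.2.contains lk.2 then st.1
       else st.1 ++ [pvAnnot lk.1 (PySem.List.count keys lk.2 : Int)],
       st.2 ++ [lk.2]))
    ([], [])
  PySem.Str.join "\n" st.1

-- ===== PRECONDITION & SPEC =====
def Spec_deduplicate_logs_py (text : String) (out : String) : Prop := out = deduplicate_logs_py_alt text
instance (text : String) (out : String) : Decidable (Spec_deduplicate_logs_py text out) := by unfold Spec_deduplicate_logs_py; infer_instance

-- ===== CLAIM (what is proved, stated in full; the proofs are below) =====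
def Claim_equal_deduplicate_logs_py : Prop := ∀ (text : String), Dom_deduplicate_logs_py text → Spec_deduplicate_logs_py text (deduplicate_logs_py text)

-- ===== LEMMAS AND PROOFS =====

-- the two loop bodies, as named functions (definitionally equal to the ports' lambdas)
def pvStepA (st : PySem.Dict String (String × Int) × List String) (line : String) :
    PySem.Dict String (String × Int) × List String :=
  if pvBlank line then st
  else
    if st.1.contains (pvNorm line) then
      (st.1.modify (pvNorm line) ("", 0) (fun p => (p.1, p.2 + 1)), st.2)
    else (st.1.insert (pvNorm line) (line, 1), st.2 ++ [line])

def pvStepB (keys : List String) (st : List String × List String) (lk : String × String) :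
    List String × List String :=
  (if st.2.contains lk.2 then st.1
   else st.1 ++ [pvAnnot lk.1 (PySem.List.count keys lk.2 : Int)],
   st.2 ++ [lk.2])

-- the normalized keys of the non-blank lines, in order
def pvKeys (lines : List String) : List String :=
  (lines.filter (fun l => !pvBlank l)).map pvNorm

-- the first-occurrence lines (original text), given the list s of already-seen keys
def pvFirsts : List String → List String → List String
  | [], _ => []
  | l :: ls, s =>
    if pvBlank l then pvFirsts ls s
    else if pvNorm l ∈ s then pvFirsts ls s
    else l :: pvFirsts ls (pvNorm l :: s)

theorem pvFirsts_congr (ls : List String) (s t : List String)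
    (h : ∀ x, x ∈ s ↔ x ∈ t) : pvFirsts ls s = pvFirsts ls t := by
  induction ls generalizing s t with
  | nil => rfl
  | cons l ls ih =>
    by_cases hb : pvBlank l
    · simp [pvFirsts, hb, ih s t h]
    · by_cases hm : pvNorm l ∈ s
      · simp [pvFirsts, hb, hm, (h _).mp hm, ih s t h]
      · have hm' : pvNorm l ∉ t := fun c => hm ((h _).mpr c)
        simp only [pvFirsts, hb, hm, hm', Bool.false_eq_true, if_false]
        refine List.cons_eq_cons.mpr ⟨rfl, ih _ _ ?_⟩
        intro x; simp [h x]

theorem pvFirsts_filter (ls : List String) (s : List String) :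
    pvFirsts (ls.filter (fun l => !pvBlank l)) s = pvFirsts ls s := by
  induction ls generalizing s with
  | nil => rfl
  | cons l ls ih =>
    by_cases hb : pvBlank l
    · simp [List.filter, hb, pvFirsts, ih]
    · by_cases hm : pvNorm l ∈ s <;> simp [List.filter, hb, pvFirsts, hm, ih]

theorem pvKeys_cons_blank {l : String} (ls : List String) (hb : pvBlank l = true) :
    pvKeys (l :: ls) = pvKeys ls := by simp [pvKeys, List.filter, hb]

theorem pvKeys_cons_nonblank {l : String} (ls : List String) (hb : ¬ pvBlank l = true) :
    pvKeys (l :: ls) = pvNorm l :: pvKeys ls := by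
  simp [pvKeys, List.filter, hb]

theorem A_res (ls : List String) (d : PySem.Dict String (String × Int)) (res : List String) :
    (ls.foldl pvStepA (d, res)).2 = res ++ pvFirsts ls d.keys := by
  induction ls generalizing d res with
  | nil => simp [pvFirsts]
  | cons l ls ih =>
    rw [List.foldl_cons]
    by_cases hb : pvBlank l
    · rw [show pvStepA (d, res) l = (d, res) from by simp [pvStepA, hb]]
      simp [pvFirsts, hb, ih]
    · by_cases hc : d.contains (pvNorm l) = true
      · have hm : pvNorm l ∈ d.keys := (PySem.Dict.contains_iff_mem_keys _ _).mp hc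
        rw [show pvStepA (d, res) l
              = (d.modify (pvNorm l) ("", 0) (fun p => (p.1, p.2 + 1)), res) from by
            simp [pvStepA, hb, hc]]
        rw [ih, PySem.Dict.keys_modify, PySem.Dict.keys_insert_of_contains d _ hc]
        simp [pvFirsts, hb, hm]
      · have hm : pvNorm l ∉ d.keys := fun c =>
          hc ((PySem.Dict.contains_iff_mem_keys _ _).mpr c)
        rw [show pvStepA (d, res) l
              = (d.insert (pvNorm l) (l, 1), res ++ [l]) from by simp [pvStepA, hb, hc]]
        rw [ih, PySem.Dict.keys_insert_of_not_contains d _ (by simpa using hc)]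
        rw [pvFirsts_congr ls (d.keys ++ [pvNorm l]) (pvNorm l :: d.keys)
              (by intro x; simp; tauto)]
        simp [pvFirsts, hb, hm]

theorem A_cnt (ls : List String) (d : PySem.Dict String (String × Int)) (res : List String)
    (k : String) :
    (((ls.foldl pvStepA (d, res)).1.getD k ("", 0)).2)
      = (if d.contains k then (d.getD k ("", 0)).2 else 0) + ((pvKeys ls).count k : Int) := by
  induction ls generalizing d res with
  | nil =>
    by_cases hc : d.contains k = true
    · simp [pvKeys, hc]
    · simp [pvKeys, hc, PySem.Dict.getD_of_not_contains d _ (by simpa using hc)]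
  | cons l ls ih =>
    rw [List.foldl_cons]
    by_cases hb : pvBlank l
    · rw [show pvStepA (d, res) l = (d, res) from by simp [pvStepA, hb]]
      rw [ih, pvKeys_cons_blank ls hb]
    · rw [pvKeys_cons_nonblank ls hb]
      by_cases hc : d.contains (pvNorm l) = true
      · rw [show pvStepA (d, res) l
              = (d.modify (pvNorm l) ("", 0) (fun p => (p.1, p.2 + 1)), res) from by
            simp [pvStepA, hb, hc]]
        rw [ih, PySem.Dict.getD_modify, PySem.Dict.contains_modify]
        by_cases he : k = pvNorm l
        · subst he; simp [hc]; ring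
        · have he' : ¬ pvNorm l = k := fun h => he h.symm
          simp [he, he']
      · rw [show pvStepA (d, res) l
              = (d.insert (pvNorm l) (l, 1), res ++ [l]) from by simp [pvStepA, hb, hc]]
        rw [ih, PySem.Dict.getD_insert, PySem.Dict.contains_insert]
        by_cases he : k = pvNorm l
        · subst he; simp [hc]; ring
        · have he' : ¬ pvNorm l = k := fun h => he h.symm
          simp [he, he']

theorem B_res (keys : List String) (ls : List String) (hnb : ∀ l ∈ ls, pvBlank l = false)
    (out s : List String) :
    ((ls.zip (ls.map pvNorm)).foldl (pvStepB keys) (out, s)).1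
      = out ++ (pvFirsts ls s).map (fun l => pvAnnot l (PySem.List.count keys (pvNorm l) : Int)) := by
  induction ls generalizing out s with
  | nil => simp [pvFirsts]
  | cons l ls ih =>
    have hb : pvBlank l = false := hnb l (by simp)
    have hnb' : ∀ l ∈ ls, pvBlank l = false := fun x hx => hnb x (by simp [hx])
    rw [List.map_cons, List.zip_cons_cons, List.foldl_cons]
    by_cases hm : pvNorm l ∈ s
    · rw [show pvStepB keys (out, s) (l, pvNorm l) = (out, s ++ [pvNorm l]) from by
          simp [pvStepB, hm]]
      rw [ih hnb', pvFirsts_congr ls (s ++ [pvNorm l]) s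
            (by intro x; simp; rintro rfl; exact hm)]
      simp [pvFirsts, hb, hm]
    · rw [show pvStepB keys (out, s) (l, pvNorm l)
            = (out ++ [pvAnnot l (PySem.List.count keys (pvNorm l) : Int)], s ++ [pvNorm l])
          from by simp [pvStepB, hm]]
      rw [ih hnb', pvFirsts_congr ls (s ++ [pvNorm l]) (pvNorm l :: s) (by intro x; simp; tauto)]
      simp [pvFirsts, hb, hm]

-- ===== VERDICT (by name: the statement is the Claim_ definition above) =====
theorem deduplicate_logs_py_spec : Claim_equal_deduplicate_logs_py := by
  intro text _
  show deduplicate_logs_py text = deduplicate_logs_py_alt text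
  have hA : deduplicate_logs_py text
      = PySem.Str.join "\n"
          (((pvLines text).foldl pvStepA (PySem.Dict.empty, [])).2.map
            (fun line => pvAnnot line
              ((((pvLines text).foldl pvStepA (PySem.Dict.empty, [])).1.getD (pvNorm line)
                ("", 0)).2))) := rfl
  have hB : deduplicate_logs_py_alt text
      = PySem.Str.join "\n"
          (((((pvLines text).filter (fun l => !pvBlank l)).zip
              (((pvLines text).filter (fun l => !pvBlank l)).map pvNorm)).foldl
              (pvStepB (((pvLines text).filter (fun l => !pvBlank l)).map pvNorm))
              ([], [])).1) := rfl
  rw [hA, hB, A_res,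
      B_res _ _ (fun l hl => by simpa using (List.of_mem_filter hl)),
      pvFirsts_filter]
  simp only [PySem.Dict.keys_empty, List.nil_append]
  apply congrArg
  apply List.map_congr_left
  intro l _
  apply congrArg
  rw [A_cnt]
  simp [pvKeys, PySem.Dict.contains_empty, PySem.List.count_eq]
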